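-- pv_equiv track=rewrite | github.com/Hondarer/pub_markdown | bin/md_style_jp.py | _remove_unnecessary_trailing_spaces
-- ===== SOURCE A (Python) =====
-- from typing import Callable, List, Tuple, Union
--
-- def _remove_unnecessary_trailing_spaces(
--     result_lines: List[str], code_block_flags: List[bool]
-- ) -> List[str]:
--     """ソフト改行と見做せない行末の不要な trailing spaces を除去する。
--
--     - 行末に trailing spaces がある かつ 次行が空行 or EOF → trailing spaces を除去
--     - 行末に trailing spaces がある かつ 次行が非空行 → 保持（ソフト改行として有効）
--     - コードブロック内の行は対象外
--     """
--     n = len(result_lines)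
--     output = []
--     for i, line in enumerate(result_lines):
--         if code_block_flags[i] or not line.endswith((' ', '\t')):
--             output.append(line)
--             continue
--         next_stripped = (result_lines[i + 1] if i + 1 < n else "").strip()
--         if next_stripped:
--             output.append(line)            # 次行が非空 → ソフト改行として保持
--         else:
--             output.append(line.rstrip())   # 次行が空 or EOF → trailing spaces 除去
--     return output
-- ===== SOURCE B (Python) =====
-- from typing import List
--
-- def _remove_unnecessary_trailing_spaces(
--     result_lines: List[str], code_block_flags: List[bool]
-- ) -> List[str]:
--     out = []
--     next_is_blank = True  # EOF counts as a blank successor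
--     for i in range(len(result_lines) - 1, -1, -1):
--         line = result_lines[i]
--         if (not code_block_flags[i]) and line.endswith((' ', '\t')) and next_is_blank:
--             out.append(line.rstrip())
--         else:
--             out.append(line)
--         next_is_blank = not line.strip()
--     out.reverse()
--     return out
-- ===== Notes on version B (the rewrite author's own statement) =====
-- stated objective: alternative
-- what changed: Replaces A's forward pass that re-reads result_lines[i+1] on each step with a single backward pass carrying a next-line-is-blank boolean (EOF seeded as blank), collecting results in reverse and reversing once at the end.
import Mathlib
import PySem

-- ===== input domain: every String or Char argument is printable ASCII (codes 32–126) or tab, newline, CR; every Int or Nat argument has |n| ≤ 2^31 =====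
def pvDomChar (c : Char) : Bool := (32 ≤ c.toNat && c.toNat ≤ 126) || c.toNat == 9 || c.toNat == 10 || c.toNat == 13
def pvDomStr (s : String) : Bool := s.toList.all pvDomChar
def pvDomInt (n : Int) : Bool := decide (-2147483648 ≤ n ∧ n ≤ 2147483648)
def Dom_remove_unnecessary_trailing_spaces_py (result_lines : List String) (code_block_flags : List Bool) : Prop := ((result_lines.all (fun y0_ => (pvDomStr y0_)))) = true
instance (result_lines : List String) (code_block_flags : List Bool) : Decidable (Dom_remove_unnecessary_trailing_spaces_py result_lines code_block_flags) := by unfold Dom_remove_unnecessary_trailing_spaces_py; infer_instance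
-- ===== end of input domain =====

-- B reverses the traversal: one backward pass carrying a 'next line is blank' flag, instead of
-- A's forward pass that re-reads the next line on each step (objective: alternative decomposition).

-- ===== PORT A =====
-- forward loop over enumerate(result_lines), looking ahead at result_lines[i+1]
def remove_unnecessary_trailing_spaces_py (result_lines : List String) (code_block_flags : List Bool) : List String :=
  let n : Int := PySem.List.len result_lines
  (PySem.List.enumerate result_lines 0).foldl
    (fun output p =>
      let i := p.1
      let line := p.2
      if PySem.List.pyGetD code_block_flags i false
         || !(PySem.Str.endswith line " " || PySem.Str.endswith line "\t") then
        output ++ [line]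
      else
        let next_stripped :=
          PySem.Str.strip (if i + 1 < n then PySem.List.pyGetD result_lines (i + 1) "" else "")
        if next_stripped != "" then
          output ++ [line]
        else
          output ++ [PySem.Str.rstrip line]) []

-- ===== PORT B =====
-- backward loop over range(n-1, -1, -1) carrying next_is_blank; results reversed at the end
def remove_unnecessary_trailing_spaces_py_alt (result_lines : List String) (code_block_flags : List Bool) : List String :=
  let n : Int := PySem.List.len result_lines
  let st :=
    (PySem.List.pyRange (n - 1) (-1) (-1)).foldl
      (fun (st : List String × Bool) i =>
        let line := PySem.List.pyGetD result_lines i ""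
        let out :=
          if !(PySem.List.pyGetD code_block_flags i false)
             && (PySem.Str.endswith line " " || PySem.Str.endswith line "\t")
             && st.2 then
            st.1 ++ [PySem.Str.rstrip line]
          else
            st.1 ++ [line]
        (out, PySem.Str.strip line == "")) ([], true)
  st.1.reverse

-- ===== PRECONDITION & SPEC =====
-- A raises IndexError on code_block_flags[i] when code_block_flags is shorter than result_lines.
def Pre_remove_unnecessary_trailing_spaces_py (result_lines : List String) (code_block_flags : List Bool) : Prop :=
  result_lines.length ≤ code_block_flags.length
instance (result_lines : List String) (code_block_flags : List Bool) : Decidable (Pre_remove_unnecessary_trailing_spaces_py result_lines code_block_flags) := by unfold Pre_remove_unnecessary_trailing_spaces_py; infer_instance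

def pvWitness_remove_unnecessary_trailing_spaces_py : List String × List Bool :=
  (["a  ", "", "b "], [false, false, false])

def Spec_remove_unnecessary_trailing_spaces_py (result_lines : List String) (code_block_flags : List Bool) (out : List String) : Prop := out = remove_unnecessary_trailing_spaces_py_alt result_lines code_block_flags
instance (result_lines : List String) (code_block_flags : List Bool) (out : List String) : Decidable (Spec_remove_unnecessary_trailing_spaces_py result_lines code_block_flags out) := by unfold Spec_remove_unnecessary_trailing_spaces_py; infer_instance

-- ===== CLAIM (what is proved, stated in full; the proofs are below) =====
def Claim_equal_remove_unnecessary_trailing_spaces_py : Prop := ∀ (result_lines : List String) (code_block_flags : List Bool), Dom_remove_unnecessary_trailing_spaces_py result_lines code_block_flags → Pre_remove_unnecessary_trailing_spaces_py result_lines code_block_flags → Spec_remove_unnecessary_trailing_spaces_py result_lines code_block_flags (remove_unnecessary_trailing_spaces_py result_lines code_block_flags)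

-- ===== LEMMAS AND PROOFS =====

-- blankness of line j (0 ≤ j; out of range = EOF = blank)
def pvNb (lines : List String) (j : Int) : Bool :=
  PySem.Str.strip (PySem.List.pyGetD lines j "") == ""

-- common per-line value at index j
def pvF (lines : List String) (flags : List Bool) (j : Int) : String :=
  let line := PySem.List.pyGetD lines j ""
  if !(PySem.List.pyGetD flags j false)
     && (PySem.Str.endswith line " " || PySem.Str.endswith line "\t")
     && pvNb lines (j + 1) then
    PySem.Str.rstrip line
  else
    line

lemma pvFoldl_append_map {a b : Type} (g : a -> b) (l : List a) (init : List b) :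
    l.foldl (fun acc x => acc ++ [g x]) init = init ++ l.map g := by
  induction l generalizing init with
  | nil => simp
  | cons x xs ih => simp [List.foldl, ih]

lemma pvRange_cast (n : Nat) : PySem.List.pyRange 0 (n:Int) 1 = (List.range n).map (fun k => (k:Int)) := by
  rw [PySem.List.pyRange_one]
  simp
  induction n with
  | zero => simp
  | succ m ih => simp [List.range_succ, ih]

lemma pvGetD_oob (lines : List String) (j : Int) (h : (lines.length:Int) <= j) :
    PySem.List.pyGetD lines j "" = "" := by
  simp only [PySem.List.pyGetD, PySem.List.pyGet?, PySem.List.pyIdx?]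
  split_ifs <;> simp_all <;> omega

lemma pvStrip_empty : PySem.Str.strip "" = "" := by decide

lemma pvA_map (lines : List String) (flags : List Bool) :
    remove_unnecessary_trailing_spaces_py lines flags
      = (List.range lines.length).map (fun k => pvF lines flags (k:Int)) := by
  unfold remove_unnecessary_trailing_spaces_py
  rw [PySem.List.enumerate_eq_map_pyRange (d := "")]
  rw [List.foldl_map]
  have hb : (fun (output : List String) (j : Int) =>
      (fun output (p : Int × String) =>
      if PySem.List.pyGetD flags p.1 false
         || !(PySem.Str.endswith p.2 " " || PySem.Str.endswith p.2 "\t") then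
        output ++ [p.2]
      else
        if PySem.Str.strip (if p.1 + 1 < PySem.List.len lines then PySem.List.pyGetD lines (p.1 + 1) "" else "") != "" then
          output ++ [p.2]
        else
          output ++ [PySem.Str.rstrip p.2]) output (j, PySem.List.pyGetD lines j "")) =
      (fun output j => output ++ [pvF lines flags j]) := by
    funext o j
    have hnext : (if j + 1 < PySem.List.len lines then PySem.List.pyGetD lines (j + 1) "" else "")
        = PySem.List.pyGetD lines (j + 1) "" := by
      split_ifs with hn
      · rfl
      · rw [pvGetD_oob]
        simp only [PySem.List.len_eq] at hn
        omega
    simp only [hnext]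
    cases hfl : PySem.List.pyGetD flags j false <;>
      cases he1 : PySem.Chars.endswith (PySem.List.pyGetD lines j "").toList [' '] <;>
      cases he2 : PySem.Chars.endswith (PySem.List.pyGetD lines j "").toList ['\t'] <;>
      by_cases hnb : PySem.Str.strip (PySem.List.pyGetD lines (j + 1) "") = "" <;>
      simp [pvF, pvNb, hfl, he1, he2, hnb]
  rw [hb, pvFoldl_append_map]
  simp only [PySem.List.len_eq, pvRange_cast, List.map_map, List.nil_append]
  rfl

lemma pvB_go (lines : List String) (flags : List Bool) :
    ∀ (k : Nat), k <= lines.length -> ∀ (out : List String) (b : Bool), b = pvNb lines (k:Int) ->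
    (((PySem.List.pyRange ((k:Int) - 1) (-1) (-1)).foldl
      (fun (st : List String × Bool) i =>
        let line := PySem.List.pyGetD lines i ""
        let o :=
          if !(PySem.List.pyGetD flags i false)
             && (PySem.Str.endswith line " " || PySem.Str.endswith line "\t")
             && st.2 then
            st.1 ++ [PySem.Str.rstrip line]
          else
            st.1 ++ [line]
        (o, PySem.Str.strip line == "")) (out, b)).1)
      = out ++ ((List.range k).map (fun j => pvF lines flags (j:Int))).reverse := by
  intro k
  induction k with
  | zero =>
    intro _ out b _
    rw [show ((0:Nat):Int) - 1 = -1 by norm_num,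
        PySem.List.pyRange_neg_one_eq_nil (le_refl _)]
    simp
  | succ m ih =>
    intro hk out b hb
    rw [show ((m+1:Nat):Int) - 1 = (m:Int) by omega,
        PySem.List.pyRange_neg_one_cons (by omega : (-1:Int) < (m:Int))]
    rw [List.foldl_cons]
    have hnb1 : pvNb lines ((m:Int) + 1) = b := by
      rw [hb]; norm_cast
    have hstep :
        (let line := PySem.List.pyGetD lines ((m:Nat):Int) ""
         let o :=
            if !(PySem.List.pyGetD flags ((m:Nat):Int) false)
               && (PySem.Str.endswith line " " || PySem.Str.endswith line "\t")
               && (out, b).2 then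
              (out, b).1 ++ [PySem.Str.rstrip line]
            else
              (out, b).1 ++ [line]
         (o, PySem.Str.strip line == ""))
        = (out ++ [pvF lines flags (m:Int)], pvNb lines (m:Int)) := by
      simp only [pvF, pvNb, ← hnb1]
      split <;> rfl
    rw [hstep, ih (by omega) (out ++ [pvF lines flags (m:Int)]) _ rfl]
    simp [List.range_succ]

lemma pvB_map (lines : List String) (flags : List Bool) :
    remove_unnecessary_trailing_spaces_py_alt lines flags
      = (List.range lines.length).map (fun k => pvF lines flags (k:Int)) := by
  have hinit : (true : Bool) = pvNb lines ((lines.length : Nat) : Int) := by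
    simp [pvNb, pvGetD_oob lines (lines.length:Int) (le_refl _), pvStrip_empty]
  have h := pvB_go lines flags lines.length (le_refl _) [] true hinit
  simp only [remove_unnecessary_trailing_spaces_py_alt, PySem.List.len_eq]
  rw [h]
  simp

theorem remove_unnecessary_trailing_spaces_py_spec : Claim_equal_remove_unnecessary_trailing_spaces_py := by
  intro lines flags _ _
  unfold Spec_remove_unnecessary_trailing_spaces_py
  rw [pvA_map, pvB_map]
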